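-- pv_equiv track=rewrite | github.com/RascalTwo/DailyProblem | problems/Arbitrary/016/solve.py | solve
-- ===== SOURCE A (Python) =====
-- from typing import Dict, List, Set
--
-- def solve(relation_map: Dict[str, List[str]]) -> List[Set[str]]:
-- 	groups: List[Set[str]] = []
--
-- 	for person, friends in relation_map.items():
-- 		found = False
-- 		for group in groups:
-- 			if person in group:
-- 				group |= set(friends)
-- 				found = True
--
-- 		if not found:
-- 			groups.append(set([person, *friends]))
--
-- 	return groups
-- ===== SOURCE B (Python) =====
-- from typing import Dict, List, Set
--
-- def solve(relation_map: Dict[str, List[str]]) -> List[Set[str]]: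
-- 	groups: List[Set[str]] = []
-- 	index: Dict[str, List[int]] = {}  # member -> indices of groups containing it
--
-- 	for person, friends in relation_map.items():
-- 		ids = index.get(person, [])
-- 		if ids:
-- 			for gid in ids:
-- 				group = groups[gid]
-- 				for f in friends:
-- 					if f not in group:
-- 						group.add(f)
-- 						index.setdefault(f, []).append(gid)
-- 		else:
-- 			gid = len(groups)
-- 			group = set()
-- 			for m in [person, *friends]:
-- 				if m not in group:
-- 					group.add(m)
-- 					index.setdefault(m, []).append(gid)
-- 			groups.append(group)
--
-- 	return groups
-- ===== Notes on version B (the rewrite author's own statement) =====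
-- stated objective: faster
-- what changed: Instead of scanning every existing group for each person, B maintains a dict mapping each member to the list of group indices containing it, so each item updates only the groups that actually contain the person (O(1) lookup) while keeping the index in sync as friends are added.
import Mathlib
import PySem

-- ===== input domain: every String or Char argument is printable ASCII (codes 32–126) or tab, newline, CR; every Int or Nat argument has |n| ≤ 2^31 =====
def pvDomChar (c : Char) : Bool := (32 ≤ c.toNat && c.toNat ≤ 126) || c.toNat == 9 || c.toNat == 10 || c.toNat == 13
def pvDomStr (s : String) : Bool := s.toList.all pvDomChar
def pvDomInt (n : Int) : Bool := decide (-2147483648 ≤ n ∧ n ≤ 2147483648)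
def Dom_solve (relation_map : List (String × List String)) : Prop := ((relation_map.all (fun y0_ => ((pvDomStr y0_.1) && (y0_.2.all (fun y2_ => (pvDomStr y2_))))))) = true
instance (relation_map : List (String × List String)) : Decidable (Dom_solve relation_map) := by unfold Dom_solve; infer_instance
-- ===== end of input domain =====

-- B replaces A's scan over all existing groups per item by a member→group-indices dict, updating
-- only the groups that contain the person (objective: faster); same return value.

-- ===== PORT A =====
def pvAStep (st : List (PySem.Set String) × Bool) (person : String) (friends : List String)
    (g : PySem.Set String) : List (PySem.Set String) × Bool :=
  if PySem.Set.contains g person then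
    (st.1 ++ [PySem.Set.union g (PySem.Set.ofList friends)], true)
  else (st.1 ++ [g], st.2)

def pvAItem (groups : List (PySem.Set String)) (person : String) (friends : List String) :
    List (PySem.Set String) :=
  let r := groups.foldl (fun st g => pvAStep st person friends g) ([], false)
  if r.2 then r.1 else r.1 ++ [PySem.Set.ofList (person :: friends)]

def pvAddFriend (gid : Nat) (st : PySem.Set String × PySem.Dict String (List Nat)) (f : String) :
    PySem.Set String × PySem.Dict String (List Nat) :=
  if PySem.Set.contains st.1 f then st
  else (PySem.Set.add st.1 f, st.2.modify f [] (fun l => l ++ [gid]))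

def pvGroupStep (friends : List String)
    (st : List (PySem.Set String) × PySem.Dict String (List Nat)) (gid : Nat) :
    List (PySem.Set String) × PySem.Dict String (List Nat) :=
  let r := friends.foldl (pvAddFriend gid) (st.1.getD gid [], st.2)
  (st.1.set gid r.1, r.2)

def pvBItem (st : List (PySem.Set String) × PySem.Dict String (List Nat))
    (person : String) (friends : List String) :
    List (PySem.Set String) × PySem.Dict String (List Nat) :=
  let ids := st.2.getD person []
  if ids.isEmpty then
    let gid := st.1.length
    let r := (person :: friends).foldl (pvAddFriend gid) (PySem.Set.empty, st.2)
    (st.1 ++ [r.1], r.2)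
  else
    ids.foldl (pvGroupStep friends) st

def solve (relation_map : List (String × List String)) : List (List String) :=
  relation_map.foldl (fun groups pf => pvAItem groups pf.1 pf.2) []

-- ===== PORT B =====
-- (pvAddFriend, pvGroupStep, pvBItem above are B's helpers; pvAStep/pvAItem are A's)
def solve_alt (relation_map : List (String × List String)) : List (List String) :=
  (relation_map.foldl (fun st pf => pvBItem st pf.1 pf.2) ([], PySem.Dict.empty)).1

-- ===== PRECONDITION & SPEC =====
def Spec_solve (relation_map : List (String × List String)) (out : List (List String)) : Prop := out = solve_alt relation_map
instance (relation_map : List (String × List String)) (out : List (List String)) : Decidable (Spec_solve relation_map out) := by unfold Spec_solve; infer_instance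

-- ===== CLAIM (what is proved, stated in full; the proofs are below) =====
def Claim_equal_solve : Prop := ∀ (relation_map : List (String × List String)), Dom_solve relation_map → Spec_solve relation_map (solve relation_map)

-- ===== LEMMAS AND PROOFS =====

-- the index invariant: idx maps each member to the nodup list of indices of groups containing it
def pvInv (groups : List (PySem.Set String)) (idx : PySem.Dict String (List Nat)) : Prop :=
  ∀ x : String, (idx.getD x []).Nodup ∧
    ∀ gid : Nat, gid ∈ idx.getD x [] ↔ ∃ h : gid < groups.length, x ∈ groups[gid]

-- gid is recorded under x by one item-step iff x is a friend newly added to group gid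
def pvPred (x : String) (fs : List String) (groups : List (PySem.Set String)) (gid : Nat) : Bool :=
  decide (x ∈ fs) && !(PySem.Set.contains (groups.getD gid []) x)

theorem pvAddFriend_fold (gid : Nat) (fs : List String) (g0 : PySem.Set String)
    (idx : PySem.Dict String (List Nat)) :
    (fs.foldl (pvAddFriend gid) (g0, idx)).1 = PySem.Set.update g0 fs ∧
    ∀ x : String, (fs.foldl (pvAddFriend gid) (g0, idx)).2.getD x [] =
      if x ∈ fs ∧ x ∉ g0 then idx.getD x [] ++ [gid] else idx.getD x [] := by
  induction fs generalizing g0 idx with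
  | nil => exact ⟨by simp [PySem.Set.update], by intro x; simp⟩
  | cons f fs ih =>
    simp only [List.foldl_cons]
    by_cases hf : f ∈ g0
    · have hstep : pvAddFriend gid (g0, idx) f = (g0, idx) := by
        simp [pvAddFriend, hf]
      rw [hstep]
      obtain ⟨h1, h2⟩ := ih g0 idx
      refine ⟨by rw [h1]; simp [PySem.Set.update, PySem.Set.add_of_mem hf], ?_⟩
      intro x
      rw [h2 x]
      have hc : (x ∈ f :: fs ∧ x ∉ g0) ↔ (x ∈ fs ∧ x ∉ g0) := by
        simp only [List.mem_cons]
        constructor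
        · rintro ⟨hm | hm, hn⟩
          · exact absurd (hm ▸ hf) hn
          · exact ⟨hm, hn⟩
        · exact fun ⟨hm, hn⟩ => ⟨Or.inr hm, hn⟩
      rw [if_congr hc rfl rfl]
    · have hstep : pvAddFriend gid (g0, idx) f =
          (PySem.Set.add g0 f, idx.modify f [] (fun l => l ++ [gid])) := by
        simp [pvAddFriend, hf]
      rw [hstep]
      obtain ⟨h1, h2⟩ := ih (PySem.Set.add g0 f) (idx.modify f [] (fun l => l ++ [gid]))
      refine ⟨by rw [h1]; simp [PySem.Set.update], ?_⟩
      intro x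
      rw [h2 x]
      by_cases hx : x = f
      · subst hx
        have : ¬ (x ∈ fs ∧ x ∉ PySem.Set.add g0 x) := by
          simp [PySem.Set.mem_add]
        rw [if_neg this, PySem.Dict.getD_modify_self]
        have : (x ∈ x :: fs ∧ x ∉ g0) := ⟨List.mem_cons_self, hf⟩
        rw [if_pos this]
      · rw [PySem.Dict.getD_modify_of_ne (hne := hx)]
        have hc : (x ∈ fs ∧ x ∉ PySem.Set.add g0 f) ↔ (x ∈ f :: fs ∧ x ∉ g0) := by
          simp only [PySem.Set.mem_add, List.mem_cons]
          constructor
          · rintro ⟨hm, hn⟩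
            exact ⟨Or.inr hm, fun h => hn (Or.inl h)⟩
          · rintro ⟨hm | hm, hn⟩
            · exact absurd hm hx
            · exact ⟨hm, by simp [hx, hn]⟩
        rw [if_congr hc rfl rfl]

theorem pvGroupStep_fold (fs : List String) (ids : List Nat)
    (groups : List (PySem.Set String)) (idx : PySem.Dict String (List Nat))
    (hnd : ids.Nodup) (hlt : ∀ g ∈ ids, g < groups.length) :
    (ids.foldl (pvGroupStep fs) (groups, idx)).1.length = groups.length ∧
    (∀ j : Nat, ((ids.foldl (pvGroupStep fs) (groups, idx)).1).getD j [] =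
        if j ∈ ids then PySem.Set.update (groups.getD j []) fs else groups.getD j []) ∧
    (∀ x : String, (ids.foldl (pvGroupStep fs) (groups, idx)).2.getD x [] =
      idx.getD x [] ++ ids.filter (pvPred x fs groups)) := by
  induction ids generalizing groups idx with
  | nil => exact ⟨rfl, fun j => by simp, fun x => by simp⟩
  | cons gid0 rest ih =>
    obtain ⟨hg0, hrest⟩ := List.nodup_cons.mp hnd
    have hlt0 : gid0 < groups.length := hlt gid0 List.mem_cons_self
    obtain ⟨hu, hidx1⟩ := pvAddFriend_fold gid0 fs (groups.getD gid0 []) idx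
    simp only [List.foldl_cons]
    have hstep : pvGroupStep fs (groups, idx) gid0 =
        (groups.set gid0 (PySem.Set.update (groups.getD gid0 []) fs),
         (fs.foldl (pvAddFriend gid0) (groups.getD gid0 [], idx)).2) := by
      simp only [pvGroupStep, hu]
    rw [hstep]
    set groups1 := groups.set gid0 (PySem.Set.update (groups.getD gid0 []) fs) with hgroups1
    set idx1 := (fs.foldl (pvAddFriend gid0) (groups.getD gid0 [], idx)).2 with hidx1def
    have hlen1 : groups1.length = groups.length := by simp [hgroups1]
    have hget1 : ∀ j : Nat, groups1.getD j [] =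
        if j = gid0 then PySem.Set.update (groups.getD j []) fs else groups.getD j [] := by
      intro j
      by_cases hj : j = gid0
      · subst hj
        simp [hgroups1, List.getD_eq_getElem?_getD, hlt0]
      · simp [hgroups1, List.getD_eq_getElem?_getD, Ne.symm hj, hj]
    obtain ⟨ihl, ihg, ihx⟩ := ih groups1 idx1 hrest
      (fun g hg => by rw [hlen1]; exact hlt g (List.mem_cons_of_mem _ hg))
    refine ⟨by rw [ihl, hlen1], ?_, ?_⟩
    · intro j
      rw [ihg j, hget1 j]
      by_cases hj : j = gid0
      · subst hj
        simp [hg0, List.mem_cons]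
      · by_cases hjr : j ∈ rest
        · simp [hjr, hj, List.mem_cons]
        · simp [hjr, hj, List.mem_cons]
    · intro x
      rw [ihx x]
      have hfc : rest.filter (pvPred x fs groups1) = rest.filter (pvPred x fs groups) := by
        apply List.filter_congr
        intro g hg
        have hne : g ≠ gid0 := fun h => hg0 (h ▸ hg)
        unfold pvPred
        rw [hget1 g, if_neg hne]
      rw [hfc, hidx1 x, List.filter_cons]
      by_cases hc : x ∈ fs ∧ x ∉ groups.getD gid0 []
      · obtain ⟨hc1, hc2⟩ := hc
        rw [List.getD_eq_getElem?_getD] at hc2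
        have hp : pvPred x fs groups gid0 = true := by
          simp [pvPred, hc1, hc2, List.getD_eq_getElem?_getD]
        rw [if_pos ⟨hc1, by rw [List.getD_eq_getElem?_getD]; exact hc2⟩, hp]
        simp
      · have hp : pvPred x fs groups gid0 = false := by
          by_cases h1 : x ∈ fs
          · have h2 : x ∈ groups.getD gid0 [] := by tauto
            rw [List.getD_eq_getElem?_getD] at h2
            simp [pvPred, h2, List.getD_eq_getElem?_getD]
          · simp [pvPred, h1]
        rw [if_neg hc, hp]
        simp

theorem pvFoldlAdd (t : List String) : ∀ s : PySem.Set String,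
    List.foldl PySem.Set.add s t = s ++ (PySem.Set.ofList t).filter (fun x => decide (x ∉ s)) := by
  induction t with
  | nil => intro s; simp [PySem.Set.ofList]
  | cons a t ih =>
    intro s
    have hof : PySem.Set.ofList (a :: t) = [a] ++ (PySem.Set.ofList t).filter (fun x => decide (x ∉ ([a] : List String))) := by
      rw [PySem.Set.ofList_eq_foldl, List.foldl_cons]
      have h0 : PySem.Set.add [] a = [a] := rfl
      rw [h0, ih [a]]
    rw [List.foldl_cons, hof]
    by_cases ha : a ∈ s
    · rw [PySem.Set.add_of_mem ha, ih s]
      congr 1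
      rw [List.filter_append, List.filter_filter]
      have h1 : List.filter (fun x => decide (x ∉ s)) [a] = [] := by simp [ha]
      rw [h1, List.nil_append]
      apply List.filter_congr
      intro x _
      by_cases hx : x = a
      · subst hx; simp [ha]
      · simp [hx]
    · rw [PySem.Set.add_of_not_mem ha, ih (s ++ [a])]
      rw [List.filter_append, List.filter_filter]
      have h1 : List.filter (fun x => decide (x ∉ s)) [a] = [a] := by simp [ha]
      rw [h1]
      have h2 : ∀ x : String, (decide (x ∉ s) && decide (x ∉ ([a] : List String))) = decide (x ∉ s ++ [a]) := by
        intro x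
        by_cases hx : x = a <;> by_cases hxs : x ∈ s <;> simp [hx, hxs]
      simp only [h2, List.append_assoc]

theorem pvFoldlAdd_nodup (l : List String) (hl : l.Nodup) : ∀ s : PySem.Set String,
    (∀ x ∈ l, x ∉ s) → List.foldl PySem.Set.add s l = s ++ l := by
  induction l with
  | nil => intro s _; simp
  | cons a t ih =>
    intro s hs
    obtain ⟨ha, ht⟩ := List.nodup_cons.mp hl
    rw [List.foldl_cons, PySem.Set.add_of_not_mem (hs a List.mem_cons_self)]
    rw [ih ht (s ++ [a]) ?_]
    · simp
    · intro x hx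
      simp only [List.mem_append, List.mem_singleton]
      rintro (h | h)
      · exact hs x (List.mem_cons_of_mem _ hx) h
      · exact ha (h ▸ hx)

theorem pvOfList_idem (t : List String) : PySem.Set.ofList (PySem.Set.ofList t) = PySem.Set.ofList t := by
  rw [PySem.Set.ofList_eq_foldl (xs := PySem.Set.ofList t)]
  rw [pvFoldlAdd_nodup _ (PySem.Set.nodup_ofList t) [] (by simp)]
  simp

theorem pvUnion_ofList (s : PySem.Set String) (t : List String) :
    PySem.Set.union s (PySem.Set.ofList t) = PySem.Set.update s t := by
  show List.foldl PySem.Set.add s (PySem.Set.ofList t) = List.foldl PySem.Set.add s t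
  rw [pvFoldlAdd, pvFoldlAdd, pvOfList_idem]

theorem pvAFold (p : String) (fs : List String) (groups : List (PySem.Set String))
    (init : List (PySem.Set String)) (b : Bool) :
    groups.foldl (fun st g => pvAStep st p fs g) (init, b) =
      (init ++ groups.map (fun g => if PySem.Set.contains g p then PySem.Set.union g (PySem.Set.ofList fs) else g),
       b || groups.any (fun g => PySem.Set.contains g p)) := by
  induction groups generalizing init b with
  | nil => simp
  | cons g gs ih =>
    rw [List.foldl_cons]
    by_cases hg : PySem.Set.contains g p
    · have : pvAStep (init, b) p fs g = (init ++ [PySem.Set.union g (PySem.Set.ofList fs)], true) := by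
        simp only [pvAStep]; rw [if_pos hg]
      rw [this, ih]
      have hm : p ∈ g := by simpa using hg
      simp [hm]
    · have : pvAStep (init, b) p fs g = (init ++ [g], b) := by
        simp only [pvAStep]; rw [if_neg hg]
      rw [this, ih]
      have hm : p ∉ g := by simpa using hg
      simp [hm]

theorem pvAItem_char (groups : List (PySem.Set String)) (p : String) (fs : List String) :
    pvAItem groups p fs =
      (if groups.any (fun g => PySem.Set.contains g p) then
        groups.map (fun g => if PySem.Set.contains g p then PySem.Set.union g (PySem.Set.ofList fs) else g)
      else groups ++ [PySem.Set.ofList (p :: fs)]) := by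
  unfold pvAItem
  rw [pvAFold]
  by_cases ha : groups.any (fun g => PySem.Set.contains g p)
  · simp only [ha, Bool.false_or, if_pos, List.nil_append]
  · have ha' : (groups.any fun g => PySem.Set.contains g p) = false := by
      simpa using ha
    simp only [ha', Bool.false_or, List.nil_append, if_false, Bool.false_eq_true]
    have hcong : ∀ g ∈ groups,
        (if PySem.Set.contains g p then PySem.Set.union g (PySem.Set.ofList fs) else g) = g := by
      intro g hg
      rw [if_neg]
      intro h
      have h2 := List.any_eq_true.mpr ⟨g, hg, h⟩
      simp only [PySem.Set.contains] at ha' ⊢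
      rw [ha'] at h2
      exact Bool.false_ne_true h2
    rw [List.map_congr_left hcong]
    simp

theorem pvUpdate_empty (xs : List String) :
    PySem.Set.update PySem.Set.empty xs = PySem.Set.ofList xs := by
  rw [PySem.Set.ofList_eq_foldl]; rfl

theorem pvStep_eq (groups : List (PySem.Set String)) (idx : PySem.Dict String (List Nat))
    (p : String) (fs : List String) (hinv : pvInv groups idx) :
    (pvBItem (groups, idx) p fs).1 = pvAItem groups p fs ∧
    pvInv (pvBItem (groups, idx) p fs).1 (pvBItem (groups, idx) p fs).2 := by
  have hidsnd := (hinv p).1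
  have hidsmem := (hinv p).2
  by_cases hempty : (idx.getD p []).isEmpty
  · -- person is in no group: A appends a fresh group, B does too
    have hids0 : idx.getD p [] = [] := List.isEmpty_iff.mp hempty
    have hnone : ∀ gid (h : gid < groups.length), p ∉ groups[gid] := by
      intro gid h hp
      have hmem := (hidsmem gid).mpr ⟨h, hp⟩
      rw [hids0] at hmem
      exact absurd hmem (List.not_mem_nil)
    have hany : (groups.any fun g => PySem.Set.contains g p) = false := by
      rw [List.any_eq_false]
      intro g hg
      obtain ⟨i, hi, rfl⟩ := List.mem_iff_getElem.mp hg
      intro hc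
      exact hnone i hi (by simpa using hc)
    obtain ⟨hr1, hr2⟩ := pvAddFriend_fold groups.length (p :: fs) PySem.Set.empty idx
    have hb : pvBItem (groups, idx) p fs =
        (groups ++ [PySem.Set.ofList (p :: fs)],
         ((p :: fs).foldl (pvAddFriend groups.length) (PySem.Set.empty, idx)).2) := by
      simp only [pvBItem, hempty]
      rw [if_pos trivial]
      rw [hr1, pvUpdate_empty]
    rw [hb]
    dsimp only
    constructor
    · rw [pvAItem_char, if_neg (by simp only [hany]; simp)]
    · intro x
      have hx2 := hr2 x
      have hcond : (x ∈ p :: fs ∧ x ∉ PySem.Set.empty) ↔ x ∈ p :: fs := by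
        simp [PySem.Set.empty]
      have hLnotold : groups.length ∉ idx.getD x [] := by
        intro hmem
        obtain ⟨h, _⟩ := ((hinv x).2 groups.length).mp hmem
        omega
      constructor
      · -- nodup
        rw [hx2]
        by_cases hxc : x ∈ p :: fs
        · rw [if_pos (hcond.mpr hxc)]
          simp only [List.nodup_append, (hinv x).1, true_and]
          refine ⟨List.nodup_singleton _, ?_⟩
          intro a ha b hbm heq
          rw [List.mem_singleton] at hbm
          rw [heq, hbm] at ha
          exact hLnotold ha
        · rw [if_neg (fun h => hxc (hcond.mp h))]
          exact (hinv x).1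
      · intro gid
        rw [hx2]
        have hlen : (groups ++ [PySem.Set.ofList (p :: fs)]).length = groups.length + 1 := by simp
        constructor
        · intro hmem
          by_cases hxc : x ∈ p :: fs
          · rw [if_pos (hcond.mpr hxc)] at hmem
            rcases List.mem_append.mp hmem with hold | hnew
            · obtain ⟨h, hx⟩ := ((hinv x).2 gid).mp hold
              exact ⟨by omega, by rw [List.getElem_append_left h]; exact hx⟩
            · have hgid : gid = groups.length := by simpa using hnew
              subst hgid
              refine ⟨by omega, ?_⟩
              rw [List.getElem_append_right (by omega)]
              simpa using (PySem.Set.mem_ofList _ _).mpr hxc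
          · rw [if_neg (fun h => hxc (hcond.mp h))] at hmem
            obtain ⟨h, hx⟩ := ((hinv x).2 gid).mp hmem
            exact ⟨by omega, by rw [List.getElem_append_left h]; exact hx⟩
        · rintro ⟨h, hx⟩
          rw [hlen] at h
          by_cases hgid : gid < groups.length
          · rw [List.getElem_append_left hgid] at hx
            have hold := ((hinv x).2 gid).mpr ⟨hgid, hx⟩
            by_cases hxc : x ∈ p :: fs
            · rw [if_pos (hcond.mpr hxc)]
              exact List.mem_append.mpr (Or.inl hold)
            · rw [if_neg (fun hh => hxc (hcond.mp hh))]
              exact hold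
          · have hgid' : gid = groups.length := by omega
            subst hgid'
            rw [List.getElem_append_right (by omega)] at hx
            have hxc : x ∈ p :: fs := (PySem.Set.mem_ofList _ _).mp (by simpa using hx)
            rw [if_pos (hcond.mpr hxc)]
            exact List.mem_append.mpr (Or.inr (by simp))
  · -- person is in some group(s): A updates exactly the groups listed in the index
    have hlt : ∀ g ∈ idx.getD p [], g < groups.length := by
      intro g hg
      obtain ⟨h, _⟩ := (hidsmem g).mp hg
      exact h
    obtain ⟨hLen, hGet, hIdx⟩ := pvGroupStep_fold fs (idx.getD p []) groups idx hidsnd hlt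
    have hb : pvBItem (groups, idx) p fs = (idx.getD p []).foldl (pvGroupStep fs) (groups, idx) := by
      simp only [pvBItem]
      rw [if_neg (by simpa using hempty)]
    have hmemiff : ∀ gid (h : gid < groups.length), gid ∈ idx.getD p [] ↔ p ∈ groups[gid] := by
      intro gid h
      rw [hidsmem gid]
      exact ⟨fun ⟨_, hx⟩ => hx, fun hx => ⟨h, hx⟩⟩
    have hany : (groups.any fun g => PySem.Set.contains g p) = true := by
      rw [List.any_eq_true]
      obtain ⟨gid, hgid⟩ := List.exists_mem_of_ne_nil _ (by simpa [List.isEmpty_iff] using hempty)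
      have h := hlt gid hgid
      exact ⟨groups[gid], List.getElem_mem h, by simpa using (hmemiff gid h).mp hgid⟩
    rw [hb]
    constructor
    · rw [pvAItem_char, if_pos (by simp only [hany])]
      apply List.ext_getElem
      · rw [hLen]; simp
      · intro i h1 h2
        have hi : i < groups.length := by rw [← hLen]; exact h1
        have hgd := hGet i
        rw [List.getD_eq_getElem _ _ h1, List.getD_eq_getElem _ _ hi] at hgd
        rw [hgd, List.getElem_map]
        by_cases hin : i ∈ idx.getD p []
        · rw [if_pos hin, if_pos (by simpa using (hmemiff i hi).mp hin), pvUnion_ofList]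
        · rw [if_neg hin, if_neg (by simpa using (fun hc => hin ((hmemiff i hi).mpr hc)))]
    · intro x
      have hx2 := hIdx x
      constructor
      · rw [hx2]
        refine List.Nodup.append (hinv x).1 (List.Nodup.filter _ hidsnd) ?_
        intro gid hgold hgf
        obtain ⟨hgin, hgp⟩ := List.mem_filter.mp hgf
        have hg := hlt gid hgin
        obtain ⟨_, hxg⟩ := ((hinv x).2 gid).mp hgold
        have : x ∉ groups[gid] := by
          have := (Bool.and_eq_true _ _).mp hgp |>.2
          simp only [Bool.not_eq_true'] at this
          intro hc
          have hcc : PySem.Set.contains (groups.getD gid []) x = true := by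
            rw [List.getD_eq_getElem _ _ hg]
            simpa using hc
          rw [hcc] at this
          simp at this
        exact this hxg
      · intro gid
        rw [hx2]
        have hlen2 : ((idx.getD p []).foldl (pvGroupStep fs) (groups, idx)).1.length = groups.length := hLen
        constructor
        · intro hmem
          rcases List.mem_append.mp hmem with hold | hf
          · obtain ⟨h, hxg⟩ := ((hinv x).2 gid).mp hold
            refine ⟨by omega, ?_⟩
            have hgd := hGet gid
            rw [List.getD_eq_getElem _ _ (by omega : gid < (_ : List _).length), List.getD_eq_getElem _ _ h] at hgd
            rw [hgd]
            by_cases hin : gid ∈ idx.getD p []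
            · rw [if_pos hin]
              exact (PySem.Set.mem_update _ _ _).mpr (Or.inl hxg)
            · rw [if_neg hin]; exact hxg
          · obtain ⟨hgin, hgp⟩ := List.mem_filter.mp hf
            have h := hlt gid hgin
            obtain ⟨hxfs, -⟩ := (Bool.and_eq_true _ _).mp hgp
            refine ⟨by omega, ?_⟩
            have hgd := hGet gid
            rw [List.getD_eq_getElem _ _ (by omega : gid < (_ : List _).length), List.getD_eq_getElem _ _ h] at hgd
            rw [hgd, if_pos hgin]
            exact (PySem.Set.mem_update _ _ _).mpr (Or.inr (by simpa using hxfs))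
        · rintro ⟨h, hxg⟩
          have h' : gid < groups.length := by omega
          have hgd := hGet gid
          rw [List.getD_eq_getElem _ _ (by omega : gid < (_ : List _).length), List.getD_eq_getElem _ _ h'] at hgd
          rw [hgd] at hxg
          by_cases hin : gid ∈ idx.getD p []
          · rw [if_pos hin] at hxg
            rcases (PySem.Set.mem_update _ _ _).mp hxg with hxold | hxfs
            · exact List.mem_append.mpr (Or.inl (((hinv x).2 gid).mpr ⟨h', hxold⟩))
            · by_cases hxold : x ∈ groups[gid]
              · exact List.mem_append.mpr (Or.inl (((hinv x).2 gid).mpr ⟨h', hxold⟩))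
              · refine List.mem_append.mpr (Or.inr (List.mem_filter.mpr ⟨hin, ?_⟩))
                unfold pvPred
                rw [List.getD_eq_getElem _ _ h']
                simp [hxfs, hxold]
          · rw [if_neg hin] at hxg
            exact List.mem_append.mpr (Or.inl (((hinv x).2 gid).mpr ⟨h', hxg⟩))

theorem pvFold_eq (rel : List (String × List String)) (groups : List (PySem.Set String))
    (idx : PySem.Dict String (List Nat)) (hinv : pvInv groups idx) :
    (rel.foldl (fun st pf => pvBItem st pf.1 pf.2) (groups, idx)).1 =
      rel.foldl (fun gs pf => pvAItem gs pf.1 pf.2) groups := by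
  induction rel generalizing groups idx with
  | nil => rfl
  | cons pf rest ih =>
    simp only [List.foldl_cons]
    have h := pvStep_eq groups idx pf.1 pf.2 hinv
    have hpair : pvBItem (groups, idx) pf.1 pf.2 =
        ((pvBItem (groups, idx) pf.1 pf.2).1, (pvBItem (groups, idx) pf.1 pf.2).2) := rfl
    rw [hpair, h.1]
    exact ih _ _ (h.1 ▸ h.2)

-- ===== VERDICT (by name: the statement is the Claim_ definition above) =====
theorem solve_spec : Claim_equal_solve := by
  intro rel _
  unfold Spec_solve solve solve_alt
  exact (pvFold_eq rel [] PySem.Dict.empty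
    (by intro x; constructor <;> simp [PySem.Dict.getD, PySem.Dict.get?, PySem.Dict.empty])).symm
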